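-- pv_equiv track=rewrite | github.com/aleksey-berezan/crsra-temp | course2/02_heaps/hashing/hash_substring/hash_substring.py | precompute_hashes
-- ===== SOURCE A (Python) =====
-- p = 1000000007
--
-- x = 263
--
-- def hash_code(s):
--     ans = 0
--     for c in reversed(s):
--         ans = (ans * x + ord(c)) % p
--     return ans
--
-- def precompute_hashes(pattern, text):
--     t_len = len(text)
--     p_len = len(pattern)
--
--     s = text[t_len - p_len:t_len]
--     h = [None] * (t_len - p_len + 1)
--     h[t_len - p_len] = hash_code(s)
--     y = 1
--     for i in range(1, p_len + 1):
--         y = (y * x) % p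
--
--     for i in range(t_len - p_len - 1, -1, -1):
--         h[i] = (x * h[i + 1] + ord(text[i]) - y * ord(text[i + p_len])) % p
--     return h
-- ===== SOURCE B (Python) =====
-- p = 1000000007
--
-- x = 263
--
-- def hash_code(s):
--     ans = 0
--     for c in reversed(s):
--         ans = (ans * x + ord(c)) % p
--     return ans
--
-- def precompute_hashes(pattern, text):
--     p_len = len(pattern)
--     return [hash_code(text[i:i + p_len]) for i in range(len(text) - p_len + 1)]
-- ===== Notes on version B (the rewrite author's own statement) =====
-- stated objective: simpler
-- what changed: Replaces the rolling-hash recurrence (suffix hash seeded first, precomputed power y and an O(1) subtraction update per position) with independent recomputation: a single comprehension hashing each length-p_len slice directly.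
-- crash fix: When p_len > t_len, A raises IndexError (assigning h[t_len-p_len] on an empty/short list); B returns the empty list, the natural answer since there are no windows. — e.g. on precompute_hashes("ab", "a"): A raises IndexError, B returns []
import Mathlib
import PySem

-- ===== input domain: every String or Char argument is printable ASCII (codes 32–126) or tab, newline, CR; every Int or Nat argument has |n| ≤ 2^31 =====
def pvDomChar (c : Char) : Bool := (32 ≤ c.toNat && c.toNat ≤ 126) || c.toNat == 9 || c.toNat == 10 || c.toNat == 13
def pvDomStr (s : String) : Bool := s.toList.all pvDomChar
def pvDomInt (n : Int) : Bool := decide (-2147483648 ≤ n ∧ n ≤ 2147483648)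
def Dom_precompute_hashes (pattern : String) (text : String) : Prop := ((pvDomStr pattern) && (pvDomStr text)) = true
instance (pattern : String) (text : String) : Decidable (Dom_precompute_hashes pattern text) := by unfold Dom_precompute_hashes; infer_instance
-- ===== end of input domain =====

-- B replaces A's rolling-hash recurrence with independent per-window recomputation (simpler, not faster).

-- ===== PORT A =====
-- module constants p and x
def pv_p : Int := 1000000007
def pv_x : Int := 263

-- helper hash_code(s) (identical in both modules): fold over reversed(s)
def hash_code (s : List Char) : Int :=
  s.reverse.foldl (fun ans c => PySem.Int.mod (ans * pv_x + (c.toNat : Int)) pv_p) 0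

def precompute_hashes (pattern : String) (text : String) : List Int :=
  let tl := text.toList
  let t_len : Int := tl.length
  let p_len : Int := pattern.toList.length
  let s := PySem.List.slice tl (some (t_len - p_len)) (some t_len)
  -- h = [None]*(t_len-p_len+1); h[t_len-p_len] = hash_code(s): the list is filled back to front,
  -- so the seed is the initial accumulator and each loop step conses h[i] (reading h[i+1] = head)
  let h0 := hash_code s
  let y := (PySem.List.pyRange 1 (p_len + 1) 1).foldl
             (fun y _ => PySem.Int.mod (y * pv_x) pv_p) 1
  (PySem.List.pyRange (t_len - p_len - 1) (-1) (-1)).foldl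
    (fun h i =>
      PySem.Int.mod
        (pv_x * h.headI + ((PySem.List.pyGetD tl i ' ').toNat : Int)
          - y * ((PySem.List.pyGetD tl (i + p_len) ' ').toNat : Int)) pv_p :: h)
    [h0]

-- ===== PORT B =====
def precompute_hashes_alt (pattern : String) (text : String) : List Int :=
  let tl := text.toList
  let p_len : Int := pattern.toList.length
  (PySem.List.pyRange 0 ((tl.length : Int) - p_len + 1) 1).map
    (fun i => hash_code (PySem.List.slice tl (some i) (some (i + p_len))))

-- ===== PRECONDITION & SPEC =====
-- Pre_ excludes p_len > t_len, where A raises IndexError (h[t_len-p_len] on a too-short list).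
def Pre_precompute_hashes (pattern : String) (text : String) : Prop :=
  pattern.toList.length ≤ text.toList.length
instance (pattern : String) (text : String) : Decidable (Pre_precompute_hashes pattern text) := by
  unfold Pre_precompute_hashes; infer_instance

def pvWitness_precompute_hashes : String × String := ("ab", "abcab")

-- On inputs with p_len > t_len, A raises IndexError; B returns [] (there are no windows).
def Raises_precompute_hashes (pattern : String) (text : String) : Prop :=
  text.toList.length < pattern.toList.length
instance (pattern : String) (text : String) : Decidable (Raises_precompute_hashes pattern text) := by
  unfold Raises_precompute_hashes; infer_instance
def pvRaiseWitness_precompute_hashes : String × String := ("ab", "a")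
def pvRaiseWitnessOut_precompute_hashes : List Int := []

def Spec_precompute_hashes (pattern : String) (text : String) (out : List Int) : Prop :=
  out = precompute_hashes_alt pattern text
instance (pattern : String) (text : String) (out : List Int) : Decidable (Spec_precompute_hashes pattern text out) := by
  unfold Spec_precompute_hashes; infer_instance

-- ===== CLAIM (what is proved, stated in full; the proofs are below) =====
def Claim_equal_precompute_hashes : Prop := ∀ (pattern : String) (text : String), Dom_precompute_hashes pattern text → Pre_precompute_hashes pattern text → Spec_precompute_hashes pattern text (precompute_hashes pattern text)

def Claim_raises_precompute_hashes : Prop := (∀ (pattern : String) (text : String), Dom_precompute_hashes pattern text → Raises_precompute_hashes pattern text → ¬ Pre_precompute_hashes pattern text) ∧ (Dom_precompute_hashes (pvRaiseWitness_precompute_hashes.1) (pvRaiseWitness_precompute_hashes.2) ∧ Raises_precompute_hashes (pvRaiseWitness_precompute_hashes.1) (pvRaiseWitness_precompute_hashes.2) ∧ precompute_hashes_alt (pvRaiseWitness_precompute_hashes.1) (pvRaiseWitness_precompute_hashes.2) = pvRaiseWitnessOut_precompute_hashes)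

-- ===== LEMMAS AND PROOFS =====

-- exact (un-reduced) polynomial value Σ ord(s[j])·x^j that hash_code computes mod p
def polyV : List Char → Int
  | [] => 0
  | c :: l => (c.toNat : Int) + pv_x * polyV l

-- the hash of the length-p_len window of tl starting at k (what B computes per element)
def hashOf (tl : List Char) (pl k : Nat) : Int := hash_code ((tl.drop k).take pl)

lemma pvMod (a : Int) : PySem.Int.mod a pv_p = a % pv_p :=
  PySem.Int.mod_eq_emod_of_pos (by norm_num [pv_p])

lemma mod_mul (a b : Int) : (a % pv_p * b) % pv_p = (a * b) % pv_p := by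
  rw [Int.mul_emod, Int.emod_emod_of_dvd _ dvd_rfl, ← Int.mul_emod]

lemma mod_step_congr (a b c d e : Int) :
    (a * (b % pv_p) + c - (d % pv_p) * e) % pv_p = (a * b + c - d * e) % pv_p := by
  have h1 : b % pv_p ≡ b [ZMOD pv_p] := Int.emod_emod_of_dvd b dvd_rfl
  have h2 : d % pv_p ≡ d [ZMOD pv_p] := Int.emod_emod_of_dvd d dvd_rfl
  exact ((h1.mul_left a).add_right c).sub (h2.mul_right e)

lemma hashcode_eq (l : List Char) : hash_code l = polyV l % pv_p := by
  induction l with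
  | nil => simp [hash_code, polyV]
  | cons c l ih =>
    have h1 : hash_code (c :: l) = PySem.Int.mod (hash_code l * pv_x + (c.toNat : Int)) pv_p := by
      simp [hash_code, List.foldl_append]
    rw [h1, pvMod, ih, polyV]
    calc (polyV l % pv_p * pv_x + (c.toNat : Int)) % pv_p
        = ((polyV l % pv_p * pv_x) % pv_p + (c.toNat : Int) % pv_p) % pv_p := by
          rw [Int.add_emod]
      _ = ((polyV l * pv_x) % pv_p + (c.toNat : Int) % pv_p) % pv_p := by rw [mod_mul]
      _ = (polyV l * pv_x + (c.toNat : Int)) % pv_p := by rw [← Int.add_emod]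
      _ = ((c.toNat : Int) + pv_x * polyV l) % pv_p := by congr 1; ring

lemma polyV_append_singleton (l : List Char) (c : Char) :
    polyV (l ++ [c]) = polyV l + pv_x ^ l.length * (c.toNat : Int) := by
  induction l with
  | nil => simp [polyV]
  | cons d l ih => simp [polyV, ih, pow_succ]; ring

lemma y_eq (pl : Nat) :
    (PySem.List.pyRange 1 ((pl : Int) + 1) 1).foldl
      (fun y _ => PySem.Int.mod (y * pv_x) pv_p) 1 = pv_x ^ pl % pv_p := by
  induction pl with
  | zero =>
    rw [show ((0 : Nat) : Int) + 1 = 1 by norm_num, PySem.List.pyRange_one_eq_nil le_rfl]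
    norm_num [pv_p]
  | succ pl ih =>
    rw [show ((pl + 1 : Nat) : Int) + 1 = ((pl : Int) + 1) + 1 by push_cast; ring,
        PySem.List.pyRange_one_succ_right (by omega), List.foldl_append, ih]
    simp only [List.foldl_cons, List.foldl_nil]
    rw [pvMod, mod_mul, ← pow_succ]

-- the rolling identity, as exact integers, for a window of length pl at position i
lemma roll_identity (tl : List Char) (pl i : Nat) (h : i + pl < tl.length) :
    pv_x * polyV ((tl.drop (i+1)).take pl) + ((tl[i]'(by omega)).toNat : Int)
      - pv_x ^ pl * ((tl[i+pl]'h).toNat : Int)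
    = polyV ((tl.drop i).take pl) := by
  cases pl with
  | zero => simp [polyV]
  | succ k =>
    have hi : i < tl.length := by omega
    have hlen2 : k < (tl.drop (i+1)).length := by simp; omega
    have htake : (tl.drop (i+1)).take (k+1)
        = (tl.drop (i+1)).take k ++ [(tl.drop (i+1))[k]'hlen2] := by
      rw [List.take_add_one]
      simp [List.getElem?_eq_getElem hlen2]
    have hgd : (tl.drop (i+1))[k]'hlen2 = tl[i+(k+1)]'h := by
      rw [List.getElem_drop]
      congr 1
      omega
    have hlt : ((tl.drop (i+1)).take k).length = k := by simp; omega
    rw [htake, hgd, polyV_append_singleton, hlt,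
        List.drop_eq_getElem_cons hi, List.take_succ_cons]
    show _ = polyV (tl[i] :: (tl.drop (i+1)).take k)
    rw [show polyV (tl[i] :: (tl.drop (i+1)).take k)
          = ((tl[i]'hi).toNat : Int) + pv_x * polyV ((tl.drop (i+1)).take k) from rfl,
        pow_succ]
    ring

-- one loop step of A produces the next window hash at the head
lemma step_cons (tl : List Char) (pl j : Nat) (hj : j + pl < tl.length) (t : List Int)
    (hhd : t.headI = hashOf tl pl (j+1)) :
    PySem.Int.mod (pv_x * t.headI + ((PySem.List.pyGetD tl (j : Int) ' ').toNat : Int)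
      - (pv_x ^ pl % pv_p) * ((PySem.List.pyGetD tl ((j : Int) + (pl : Int)) ' ').toNat : Int)) pv_p
    = hashOf tl pl j := by
  have hg1 : PySem.List.pyGetD tl (j : Int) ' ' = tl[j]'(by omega) := by
    rw [PySem.List.pyGetD_natCast]
    exact List.getD_eq_getElem _ _ (by omega)
  have hg2 : PySem.List.pyGetD tl ((j : Int) + (pl : Int)) ' ' = tl[j+pl]'hj := by
    rw [show (j : Int) + (pl : Int) = ((j + pl : Nat) : Int) by push_cast; ring,
        PySem.List.pyGetD_natCast]
    exact List.getD_eq_getElem _ _ hj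
  rw [hhd, hg1, hg2, pvMod, hashOf, hashOf, hashcode_eq, hashcode_eq]
  calc (pv_x * (polyV ((tl.drop (j+1)).take pl) % pv_p) + ((tl[j]'(by omega)).toNat : Int)
          - (pv_x ^ pl % pv_p) * ((tl[j+pl]'hj).toNat : Int)) % pv_p
      = (pv_x * polyV ((tl.drop (j+1)).take pl) + ((tl[j]'(by omega)).toNat : Int)
          - pv_x ^ pl * ((tl[j+pl]'hj).toNat : Int)) % pv_p := mod_step_congr _ _ _ _ _
    _ = polyV ((tl.drop j).take pl) % pv_p := by rw [roll_identity tl pl j hj]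

-- A's countdown loop, started at position j with the windows j+1 .. N already computed,
-- produces all window hashes 0 .. N
lemma loopA (tl : List Char) (pl : Nat) (hlen : pl ≤ tl.length) :
    ∀ j, j ≤ tl.length - pl →
    (PySem.List.pyRange ((j : Int) - 1) (-1) (-1)).foldl
      (fun h i =>
        PySem.Int.mod
          (pv_x * h.headI + ((PySem.List.pyGetD tl i ' ').toNat : Int)
            - (pv_x ^ pl % pv_p) * ((PySem.List.pyGetD tl (i + (pl : Int)) ' ').toNat : Int)) pv_p :: h)
      ((List.range' j (tl.length - pl + 1 - j)).map (hashOf tl pl))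
    = (List.range (tl.length - pl + 1)).map (hashOf tl pl) := by
  intro j
  induction j with
  | zero =>
    intro _
    rw [show ((0 : Nat) : Int) - 1 = -1 by norm_num,
        PySem.List.pyRange_neg_one_eq_nil le_rfl, List.foldl_nil,
        List.range_eq_range', Nat.sub_zero]
  | succ j ih =>
    intro hj
    rw [show ((j + 1 : Nat) : Int) - 1 = (j : Int) by push_cast; ring,
        PySem.List.pyRange_neg_one_cons (by omega), List.foldl_cons]
    have hacc : List.range' (j+1) (tl.length - pl + 1 - (j+1))
        = (j+1) :: List.range' (j+2) (tl.length - pl - (j+1)) := by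
      rw [show tl.length - pl + 1 - (j+1) = (tl.length - pl - (j+1)) + 1 from by omega,
          List.range'_succ]
    have hhd : ((List.range' (j+1) (tl.length - pl + 1 - (j+1))).map (hashOf tl pl)).headI
        = hashOf tl pl (j+1) := by rw [hacc]; rfl
    rw [step_cons tl pl j (by omega) _ hhd, hacc]
    have : hashOf tl pl j :: ((j+1) :: List.range' (j+2) (tl.length - pl - (j+1))).map (hashOf tl pl)
        = (List.range' j (tl.length - pl + 1 - j)).map (hashOf tl pl) := by
      rw [show tl.length - pl + 1 - j = ((tl.length - pl - (j+1)) + 1) + 1 from by omega,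
          List.range'_succ, List.range'_succ]
      rfl
    rw [this]
    exact ih (by omega)

-- ===== VERDICT (by name: the statement is the Claim_ definition above) =====
theorem precompute_hashes_spec : Claim_equal_precompute_hashes := by
  intro pattern text _ hpre
  unfold Pre_precompute_hashes at hpre
  unfold Spec_precompute_hashes precompute_hashes precompute_hashes_alt
  simp only [y_eq]
  set tl := text.toList with htl
  set pl := pattern.toList.length with hplD
  set n := tl.length with hn
  set N := n - pl with hN
  -- B's list is the map of window hashes over 0 .. N
  have hB : (PySem.List.pyRange 0 ((n : Int) - (pl : Int) + 1) 1).map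
      (fun i => hash_code (PySem.List.slice tl (some i) (some (i + (pl : Int)))))
      = (List.range (N + 1)).map (hashOf tl pl) := by
    rw [show (n : Int) - (pl : Int) + 1 = ((N + 1 : Nat) : Int) from by omega,
        PySem.List.pyRange_zero_natCast, List.map_map]
    refine List.map_congr_left ?_
    intro k _
    show hash_code (PySem.List.slice tl (some (k : Int)) (some ((k : Int) + (pl : Int)))) = _
    rw [PySem.List.slice_natCast_add]
    rfl
  -- A's seed h0 is the last window hash
  have hs : hash_code (PySem.List.slice tl (some ((n : Int) - (pl : Int))) (some (n : Int)))
      = hashOf tl pl N := by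
    rw [show (n : Int) - (pl : Int) = ((N : Nat) : Int) from by omega,
        PySem.List.slice_natCast, hashOf, show n - N = pl from by omega]
  rw [hB, hs, show (n : Int) - (pl : Int) - 1 = ((N : Nat) : Int) - 1 from by omega]
  have hacc : [hashOf tl pl N] = (List.range' N (n - pl + 1 - N)).map (hashOf tl pl) := by
    rw [show n - pl + 1 - N = 1 from by omega, List.range'_one, List.map_cons, List.map_nil]
  rw [hacc]
  exact loopA tl pl hpre N le_rfl

@[simp] theorem precompute_hashes_raises : Claim_raises_precompute_hashes := by
  unfold Claim_raises_precompute_hashes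
  exact ⟨by
    intro pa t _ hr hp
    unfold Raises_precompute_hashes at hr
    unfold Pre_precompute_hashes at hp
    omega, by decide⟩
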